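-- pv_equiv track=rewrite | github.com/GoSkyH1gh/fakemc | backend/hypixel_api.py | calculate_bedwars_level
-- ===== SOURCE A (Python) =====
-- XP_PER_BEDWARS_PRESTIGE = 487000
--
-- XP_EASY_LEVELS_BEDWARS = [500, 1000, 2000, 3500]
--
-- def calculate_bedwars_level(experience) -> int:
--     if experience <= 0:
--         return 0
--
--     # info: https://hypixel.net/threads/bedwars-level-experience-guide-2023-updated-version.5431988/
--     prestiges = experience // XP_PER_BEDWARS_PRESTIGE
--
--     level = prestiges * 100
--
--     remaining_xp = (
--         experience % XP_PER_BEDWARS_PRESTIGE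
--     )  # this will always be < 100 levels
--
--     for level_xp_required in XP_EASY_LEVELS_BEDWARS:
--         if remaining_xp > level_xp_required:
--             remaining_xp -= level_xp_required
--             level += 1
--
--     level += remaining_xp // 5000  # adding the rest of the levels
--     return int(level)
-- ===== SOURCE B (Python) =====
-- XP_PER_BEDWARS_PRESTIGE = 487000
--
-- def calculate_bedwars_level(experience) -> int:
--     if experience <= 0:
--         return 0
--     level = (experience // XP_PER_BEDWARS_PRESTIGE) * 100
--     r = experience % XP_PER_BEDWARS_PRESTIGE
--     # cumulative easy-level breakpoints: 500, 1500, 3500, 7000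
--     if r <= 500:
--         extra = 0
--     elif r <= 1500:
--         extra = 1
--     elif r <= 3500:
--         extra = 2
--     elif r <= 7000:
--         extra = 3
--     else:
--         extra = 4 + (r - 7000) // 5000
--     return int(level + extra)
-- ===== Notes on version B (the rewrite author's own statement) =====
-- stated objective: simpler
-- what changed: Replaced the subtract-and-count loop over the easy-level XP table with a closed-form piecewise on cumulative breakpoints (500/1500/3500/7000) plus (r-7000)//5000.
import Mathlib
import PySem

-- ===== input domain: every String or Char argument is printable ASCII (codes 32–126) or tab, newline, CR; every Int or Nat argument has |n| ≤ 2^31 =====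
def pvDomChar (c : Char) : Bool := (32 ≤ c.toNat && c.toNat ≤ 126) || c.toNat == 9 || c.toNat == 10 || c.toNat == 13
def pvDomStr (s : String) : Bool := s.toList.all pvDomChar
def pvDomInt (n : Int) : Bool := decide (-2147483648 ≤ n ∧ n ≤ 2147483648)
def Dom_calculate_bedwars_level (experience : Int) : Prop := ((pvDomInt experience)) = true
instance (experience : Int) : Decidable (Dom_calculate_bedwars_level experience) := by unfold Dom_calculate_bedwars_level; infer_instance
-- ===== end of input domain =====

-- B replaces A's subtract-and-count loop over the easy-level XP table with a closed-form piecewise on cumulative breakpoints (objective: simpler).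


-- ===== PORT A =====
def calculate_bedwars_level (experience : Int) : Int :=
  if experience ≤ 0 then 0
  else
    let prestiges := PySem.Int.floordiv experience 487000
    let level := prestiges * 100
    let remaining_xp := PySem.Int.mod experience 487000
    -- for level_xp_required in [500, 1000, 2000, 3500]:
    let st := [(500 : Int), 1000, 2000, 3500].foldl
      (fun (st : Int × Int) level_xp_required =>
        if st.1 > level_xp_required then (st.1 - level_xp_required, st.2 + 1) else st)
      (remaining_xp, level)
    st.2 + PySem.Int.floordiv st.1 5000

-- ===== PORT B =====
def calculate_bedwars_level_alt (experience : Int) : Int :=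
  if experience ≤ 0 then 0
  else
    let level := PySem.Int.floordiv experience 487000 * 100
    let r := PySem.Int.mod experience 487000
    let extra : Int :=
      if r ≤ 500 then 0
      else if r ≤ 1500 then 1
      else if r ≤ 3500 then 2
      else if r ≤ 7000 then 3
      else 4 + PySem.Int.floordiv (r - 7000) 5000
    level + extra

-- ===== PRECONDITION & SPEC =====
def Spec_calculate_bedwars_level (experience : Int) (out : Int) : Prop := out = calculate_bedwars_level_alt experience
instance (experience : Int) (out : Int) : Decidable (Spec_calculate_bedwars_level experience out) := by unfold Spec_calculate_bedwars_level; infer_instance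

-- ===== CLAIM (what is proved, stated in full; the proofs are below) =====
def Claim_equal_calculate_bedwars_level : Prop := ∀ (experience : Int), Dom_calculate_bedwars_level experience → Spec_calculate_bedwars_level experience (calculate_bedwars_level experience)

-- ===== LEMMAS AND PROOFS =====

-- ===== VERDICT (by name: the statement is the Claim_ definition above) =====
theorem fd5000_eq_zero (x : Int) (h0 : 0 ≤ x) (h : x < 5000) : PySem.Int.floordiv x 5000 = 0 := by
  rw [PySem.Int.floordiv_eq_iff_of_pos (by omega)]; omega

theorem calculate_bedwars_level_spec : Claim_equal_calculate_bedwars_level := by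
  intro e _
  unfold Spec_calculate_bedwars_level calculate_bedwars_level calculate_bedwars_level_alt
  by_cases he : e ≤ 0
  · simp [he]
  · simp only [he, if_false, List.foldl]
    have hr0 := PySem.Int.mod_nonneg e (b := 487000) (by omega)
    have hrlt := PySem.Int.mod_lt e (b := 487000) (by omega)
    set r := PySem.Int.mod e 487000 with hr
    set q := PySem.Int.floordiv e 487000 with hq
    by_cases h1 : r ≤ 500
    · simp only [show ¬ (r > 500) from by omega, if_false,
        show ¬ (r > 1000) from by omega, show ¬ (r > 2000) from by omega,
        show ¬ (r > 3500) from by omega, fd5000_eq_zero r hr0 (by omega), h1, if_true]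
      try ring
    · by_cases h2 : r ≤ 1500
      · simp only [show r > 500 from by omega, if_true,
          show ¬ (r - 500 > 1000) from by omega, if_false,
          show ¬ (r - 500 > 2000) from by omega, show ¬ (r - 500 > 3500) from by omega,
          fd5000_eq_zero (r - 500) (by omega) (by omega), h1, h2, if_true]
        try ring
      · by_cases h3 : r ≤ 3500
        · simp only [show r > 500 from by omega, if_true,
            show r - 500 > 1000 from by omega,
            show ¬ (r - 500 - 1000 > 2000) from by omega, if_false,
            show ¬ (r - 500 - 1000 > 3500) from by omega,
            fd5000_eq_zero (r - 500 - 1000) (by omega) (by omega), h1, h2, h3, if_true]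
          try ring
        · by_cases h4 : r ≤ 7000
          · simp only [show r > 500 from by omega, if_true,
              show r - 500 > 1000 from by omega, show r - 500 - 1000 > 2000 from by omega,
              show ¬ (r - 500 - 1000 - 2000 > 3500) from by omega, if_false,
              fd5000_eq_zero (r - 500 - 1000 - 2000) (by omega) (by omega), h1, h2, h3, h4, if_true]
            ring
          · simp only [show r > 500 from by omega, if_true,
              show r - 500 > 1000 from by omega, show r - 500 - 1000 > 2000 from by omega,
              show r - 500 - 1000 - 2000 > 3500 from by omega, h1, h2, h3, h4, if_false]
            have : r - 500 - 1000 - 2000 - 3500 = r - 7000 := by ring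
            rw [this]; try ring
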